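-- pv_equiv track=rewrite | github.com/Xander-Bruce/ITSC-3155-modules-1-and-2 | Exercise_02.py | string_to_lowerUpper
-- ===== SOURCE A (Python) =====
-- def string_to_lowerUpper(a : str) -> str:
--     lower = []
--     upper = []
--     other = []
--     final : str = ""
--
--     # For every character in the string
--     for x in a:
--
--         if x.islower():
--             lower.append(x)
--
--         elif x.isupper():
--             upper.append(x)
--
--         elif not x.isspace():
--             other.append(x)
--         #Anything else is a space
--
--     #Adding in the characters in the order, lower case, upper case, and any other character
--     for y in lower:
--         final += y
--
--     for w in upper:
--         final += w
--
--     for z in other: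
--         final += z
--
--     return final
-- ===== SOURCE B (Python) =====
-- def string_to_lowerUpper(a : str) -> str:
--     chars = [x for x in a if not x.isspace()]
--     chars.sort(key=lambda x: 0 if x.islower() else (1 if x.isupper() else 2))
--     return "".join(chars)
-- ===== Notes on version B (the rewrite author's own statement) =====
-- stated objective: idiomatic
-- what changed: Replaces the three-bucket partition with explicit append loops by one filter of non-whitespace characters followed by a stable key-sort (islower->0, isupper->1, else->2) and a join; stability preserves per-bucket order.
import Mathlib
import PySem

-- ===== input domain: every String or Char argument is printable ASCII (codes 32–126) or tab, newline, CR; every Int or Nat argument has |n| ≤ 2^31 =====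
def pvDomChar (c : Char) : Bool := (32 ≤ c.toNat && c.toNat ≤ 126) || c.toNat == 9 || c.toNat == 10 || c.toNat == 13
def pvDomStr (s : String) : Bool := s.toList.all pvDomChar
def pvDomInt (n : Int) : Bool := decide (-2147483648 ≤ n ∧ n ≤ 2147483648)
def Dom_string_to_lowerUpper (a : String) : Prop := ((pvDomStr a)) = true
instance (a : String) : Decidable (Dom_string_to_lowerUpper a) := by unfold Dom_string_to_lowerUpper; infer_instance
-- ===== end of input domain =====

-- B replaces A's three-bucket partition-and-concatenate with a filter of the
-- non-whitespace characters followed by one stable key-sort (islower→0, isupper→1, else→2).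

-- ===== PORT A =====
-- the body of A's first for-loop (the elif chain), acting on the (lower, upper, other) state
def pvStepA (s : List Char × List Char × List Char) (x : Char) :
    List Char × List Char × List Char :=
  if PySem.Chars.islower x then (s.1 ++ [x], s.2.1, s.2.2)
  else if PySem.Chars.isupper x then (s.1, s.2.1 ++ [x], s.2.2)
  else if !(PySem.Chars.isspace x) then (s.1, s.2.1, s.2.2 ++ [x])
  else s

def string_to_lowerUpper (a : String) : String :=
  let t := a.toList.foldl pvStepA ([], [], [])
  -- final += y / += w / += z, one character at a time (built as List Char; String.ofList at the end)
  let f1 := t.1.foldl (fun acc y => acc ++ [y]) ([] : List Char)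
  let f2 := t.2.1.foldl (fun acc w => acc ++ [w]) f1
  let f3 := t.2.2.foldl (fun acc z => acc ++ [z]) f2
  String.ofList f3

-- ===== PORT B =====
-- B's sort key: 0 if x.islower() else (1 if x.isupper() else 2)
def pvKeyB (c : Char) : Int :=
  if PySem.Chars.islower c then 0 else if PySem.Chars.isupper c then 1 else 2

def string_to_lowerUpper_alt (a : String) : String :=
  String.ofList (PySem.List.sorted
    (a.toList.filter (fun x => !(PySem.Chars.isspace x))) pvKeyB false)

-- ===== PRECONDITION & SPEC =====
def Spec_string_to_lowerUpper (a : String) (out : String) : Prop := out = string_to_lowerUpper_alt a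
instance (a : String) (out : String) : Decidable (Spec_string_to_lowerUpper a out) := by unfold Spec_string_to_lowerUpper; infer_instance

-- ===== CLAIM (what is proved, stated in full; the proofs are below) =====
def Claim_equal_string_to_lowerUpper : Prop := ∀ (a : String), Dom_string_to_lowerUpper a → Spec_string_to_lowerUpper a (string_to_lowerUpper a)

-- ===== LEMMAS AND PROOFS =====

-- character-class facts used to align the two predicates
lemma lower_not_space (c : Char) (h : PySem.Chars.islower c = true) :
    PySem.Chars.isspace c = false := by
  simp only [PySem.Chars.islower, Bool.and_eq_true, decide_eq_true_eq, Char.le_def,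
    UInt32.le_iff_toNat_le] at h
  have e1 : ('a'.val.toNat) = 97 := rfl
  have e2 : ('z'.val.toNat) = 122 := rfl
  simp only [PySem.Chars.isspace, Char.toNat, Bool.or_eq_false_iff, Bool.and_eq_false_iff,
    decide_eq_false_iff_not]
  omega

lemma upper_not_space (c : Char) (h : PySem.Chars.isupper c = true) :
    PySem.Chars.isspace c = false := by
  simp only [PySem.Chars.isupper, Bool.and_eq_true, decide_eq_true_eq, Char.le_def,
    UInt32.le_iff_toNat_le] at h
  have e1 : ('A'.val.toNat) = 65 := rfl
  have e2 : ('Z'.val.toNat) = 90 := rfl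
  simp only [PySem.Chars.isspace, Char.toNat, Bool.or_eq_false_iff, Bool.and_eq_false_iff,
    decide_eq_false_iff_not]
  omega

-- A's loop state after any prefix: the three filters appended to the incoming state
lemma foldl_stepA (xs : List Char) (l u o : List Char) :
    xs.foldl pvStepA (l, u, o) =
      (l ++ xs.filter (fun c => PySem.Chars.islower c),
       u ++ xs.filter (fun c => !PySem.Chars.islower c && PySem.Chars.isupper c),
       o ++ xs.filter (fun c => !PySem.Chars.islower c && !PySem.Chars.isupper c
              && !PySem.Chars.isspace c)) := by
  induction xs generalizing l u o with
  | nil => simp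
  | cons x xs ih =>
    simp only [List.foldl_cons, pvStepA]
    by_cases h1 : PySem.Chars.islower x
    · simp [h1, ih]
    · by_cases h2 : PySem.Chars.isupper x
      · simp [h1, h2, ih]
      · by_cases h3 : PySem.Chars.isspace x
        · simp [h1, h2, h3, ih]
        · simp [h1, h2, h3, ih]

-- inserting past a block no element of which triggers `before`
lemma insertBy_skip {α : Type} (before : α → α → Bool) (x : α) (L R : List α)
    (h : ∀ y ∈ L, before x y = false) :
    PySem.List.insertBy before x (L ++ R) = L ++ PySem.List.insertBy before x R := by
  induction L with
  | nil => simp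
  | cons y ys ih =>
    have hy : before x y = false := h y (by simp)
    cases R with
    | nil =>
      simp only [List.append_nil] at *
      simp [PySem.List.insertBy, hy, ih (fun z hz => h z (by simp [hz]))]
    | cons r rs =>
      simp [PySem.List.insertBy, hy, ih (fun z hz => h z (by simp [hz]))]

-- inserting before a block every element of which triggers `before`
lemma insertBy_front {α : Type} (before : α → α → Bool) (x : α) (R : List α)
    (h : ∀ y ∈ R, before x y = true) :
    PySem.List.insertBy before x R = x :: R := by
  cases R with
  | nil => simp [PySem.List.insertBy]
  | cons y ys => simp [PySem.List.insertBy, h y (by simp)]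

-- stable sort under the 3-valued key = the three key-buckets concatenated in order
lemma sorted_key3 (xs : List Char) :
    PySem.List.sorted xs pvKeyB false =
      xs.filter (fun c => pvKeyB c == 0) ++ xs.filter (fun c => pvKeyB c == 1)
        ++ xs.filter (fun c => pvKeyB c == 2) := by
  induction xs using List.reverseRecOn with
  | nil => rfl
  | append_singleton xs x ih =>
    have hk : pvKeyB x = 0 ∨ pvKeyB x = 1 ∨ pvKeyB x = 2 := by
      unfold pvKeyB; split_ifs <;> simp
    have hsort : PySem.List.sorted (xs ++ [x]) pvKeyB false =
        PySem.List.insertBy (fun a b => decide (pvKeyB a < pvKeyB b)) x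
          (PySem.List.sorted xs pvKeyB false) := by
      rw [PySem.List.sorted_eq_foldl_insertBy, PySem.List.sorted_eq_foldl_insertBy,
        List.foldl_append]
      rfl
    have h0 : ∀ y ∈ xs.filter (fun c => pvKeyB c == 0), pvKeyB y = 0 := by
      intro y hy; simpa using (List.mem_filter.mp hy).2
    have h1 : ∀ y ∈ xs.filter (fun c => pvKeyB c == 1), pvKeyB y = 1 := by
      intro y hy; simpa using (List.mem_filter.mp hy).2
    have h2 : ∀ y ∈ xs.filter (fun c => pvKeyB c == 2), pvKeyB y = 2 := by
      intro y hy; simpa using (List.mem_filter.mp hy).2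
    rw [hsort, ih]
    rcases hk with hx | hx | hx
    · rw [List.append_assoc,
        insertBy_skip _ _ _ _ (by intro y hy; simp [h0 y hy, hx]),
        insertBy_front _ _ _ (by
          intro y hy
          rcases List.mem_append.mp hy with hy | hy
          · simp [h1 y hy, hx]
          · simp [h2 y hy, hx])]
      simp [List.filter_append, hx]
    · rw [insertBy_skip _ _ _ _ (by
          intro y hy
          rcases List.mem_append.mp hy with hy | hy
          · simp [h0 y hy, hx]
          · simp [h1 y hy, hx]),
        insertBy_front _ _ _ (by intro y hy; simp [h2 y hy, hx])]
      simp [List.filter_append, hx]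
    · rw [PySem.List.insertBy_of_forall_not_before _ _ _ (by
          intro y hy
          rcases List.mem_append.mp hy with hy | hy
          · rcases List.mem_append.mp hy with hy | hy
            · simp [h0 y hy, hx]
            · simp [h1 y hy, hx]
          · simp [h2 y hy, hx])]
      simp [List.filter_append, hx]

-- the three B-buckets coincide with A's three filters
lemma bucket0 (xs : List Char) :
    (xs.filter (fun x => !PySem.Chars.isspace x)).filter (fun c => pvKeyB c == 0) =
      xs.filter (fun c => PySem.Chars.islower c) := by
  rw [List.filter_filter]
  apply List.filter_congr
  intro c _
  unfold pvKeyB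
  by_cases h : PySem.Chars.islower c
  · simp [h, lower_not_space c h]
  · by_cases h2 : PySem.Chars.isupper c <;> simp [h, h2]

lemma bucket1 (xs : List Char) :
    (xs.filter (fun x => !PySem.Chars.isspace x)).filter (fun c => pvKeyB c == 1) =
      xs.filter (fun c => !PySem.Chars.islower c && PySem.Chars.isupper c) := by
  rw [List.filter_filter]
  apply List.filter_congr
  intro c _
  unfold pvKeyB
  by_cases h : PySem.Chars.islower c
  · simp [h]
  · by_cases h2 : PySem.Chars.isupper c
    · simp [h, h2, upper_not_space c h2]
    · simp [h, h2]

lemma bucket2 (xs : List Char) :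
    (xs.filter (fun x => !PySem.Chars.isspace x)).filter (fun c => pvKeyB c == 2) =
      xs.filter (fun c => !PySem.Chars.islower c && !PySem.Chars.isupper c
        && !PySem.Chars.isspace c) := by
  rw [List.filter_filter]
  apply List.filter_congr
  intro c _
  unfold pvKeyB
  by_cases h : PySem.Chars.islower c
  · simp [h]
  · by_cases h2 : PySem.Chars.isupper c <;> simp [h, h2]

-- ===== VERDICT (by name: the statement is the Claim_ definition above) =====
theorem string_to_lowerUpper_spec : Claim_equal_string_to_lowerUpper := by
  intro a _
  show string_to_lowerUpper a = string_to_lowerUpper_alt a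
  unfold string_to_lowerUpper string_to_lowerUpper_alt
  rw [foldl_stepA, sorted_key3, bucket0, bucket1, bucket2]
  simp only [PySem.List.foldl_append_singleton, List.nil_append, List.append_assoc]
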